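-- pv_equiv track=rewrite | github.com/tazmanianDeviloper/CS111 | Man & Khaleh/recursive_with_two_base_too.py | del_first_occur
-- ===== SOURCE A (Python) =====
-- def del_first_occur(string, char):
--     a=len(string)
--     if a==0:
--         return string
--     if string[0]==char:
--         return string[1:]
--     else:
--         stored_value=del_first_occur(string[1:],char)
--         if string[0]==char:
--             return stored_value
--         else:
--             return string[0]+stored_value
-- ===== SOURCE B (Python) =====
-- def del_first_occur(string, char):
--     found = False
--     result = ""
--     for c in string:
--         if not found and c == char:
--             found = True
--             continue
--         result += c
--     return result
-- ===== Notes on version B (the rewrite author's own statement) =====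
-- stated objective: faster
-- what changed: Replaces the recursion (with its duplicated dead re-check of string[0]) by a single iterative pass with a found flag and an accumulating result string.
import Mathlib
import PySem

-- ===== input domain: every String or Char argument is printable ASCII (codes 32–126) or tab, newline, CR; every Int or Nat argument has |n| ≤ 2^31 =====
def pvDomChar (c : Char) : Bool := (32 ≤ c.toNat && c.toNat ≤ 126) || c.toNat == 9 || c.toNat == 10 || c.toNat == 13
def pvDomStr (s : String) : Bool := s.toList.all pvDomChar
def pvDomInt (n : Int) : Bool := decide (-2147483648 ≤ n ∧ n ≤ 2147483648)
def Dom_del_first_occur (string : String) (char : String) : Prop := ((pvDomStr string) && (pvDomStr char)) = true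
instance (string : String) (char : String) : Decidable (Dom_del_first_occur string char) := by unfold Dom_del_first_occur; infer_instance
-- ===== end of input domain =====

-- B replaces A's recursion (with its dead duplicated check) by one iterative pass with a found flag: simpler.


-- ===== PORT A =====
-- A's recursion over the characters; string[0] in Python is a 1-char string, so the
-- comparison string[0]==char is `String.mk [c] == char`. The redundant inner re-check
-- of string[0]==char from A is kept literally.
def delA : List Char → String → List Char
  | [], _ => []
  | c :: rest, char =>
    if String.mk [c] == char then rest
    else
      let stored_value := delA rest char
      if String.mk [c] == char then stored_value else c :: stored_value

def del_first_occur (string : String) (char : String) : String :=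
  String.mk (delA string.toList char)

-- ===== PORT B =====
-- B's single pass: state = (found flag, result so far), appending each kept character.
def stepB (char : String) (st : Bool × List Char) (c : Char) : Bool × List Char :=
  if !st.1 && String.mk [c] == char then (true, st.2) else (st.1, st.2 ++ [c])

def del_first_occur_alt (string : String) (char : String) : String :=
  String.mk ((string.toList.foldl (stepB char) (false, [])).2)

-- ===== PRECONDITION & SPEC =====
def Spec_del_first_occur (string : String) (char : String) (out : String) : Prop := out = del_first_occur_alt string char
instance (string : String) (char : String) (out : String) : Decidable (Spec_del_first_occur string char out) := by unfold Spec_del_first_occur; infer_instance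

-- ===== CLAIM (what is proved, stated in full; the proofs are below) =====
def Claim_equal_del_first_occur : Prop := ∀ (string : String) (char : String), Dom_del_first_occur string char → Spec_del_first_occur string char (del_first_occur string char)

-- ===== LEMMAS AND PROOFS =====

theorem foldl_found (char : String) (l acc : List Char) :
    l.foldl (stepB char) (true, acc) = (true, acc ++ l) := by
  induction l generalizing acc with
  | nil => simp
  | cons c rest ih =>
    rw [List.foldl_cons]
    have hf : stepB char (true, acc) c = (true, acc ++ [c]) := by simp [stepB]
    rw [hf, ih]
    simp

theorem foldl_notfound (char : String) (l acc : List Char) :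
    (l.foldl (stepB char) (false, acc)).2 = acc ++ delA l char := by
  induction l generalizing acc with
  | nil => simp [delA]
  | cons c rest ih =>
    rw [List.foldl_cons]
    by_cases h : String.mk [c] == char
    · have hf : stepB char (false, acc) c = (true, acc) := by simp [stepB, h]
      rw [hf, foldl_found]
      simp [delA, h]
    · have hf : stepB char (false, acc) c = (false, acc ++ [c]) := by simp [stepB, h]
      rw [hf, ih]
      simp [delA, h]

-- ===== VERDICT (by name: the statement is the Claim_ definition above) =====
theorem del_first_occur_spec : Claim_equal_del_first_occur := by
  intro s c _
  show del_first_occur s c = del_first_occur_alt s c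
  unfold del_first_occur del_first_occur_alt
  rw [foldl_notfound]
  simp
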